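-- pv_equiv track=rewrite | github.com/strato-space/fast-agent | examples/hf-toad-cards/skills/pr-writing-review/scripts/extract_pr_reviews.py | extract_original_from_diff_hunk
-- ===== SOURCE A (Python) =====
-- def normalize_newlines(text: str) -> str:
--     return text.replace("\r\n", "\n").replace("\r", "\n")
--
-- def extract_original_from_diff_hunk(diff_hunk: str, num_lines: int = 1) -> str:
--     """Extract the original text a comment targets from a diff hunk.
--
--     For PR review comments, GitHub provides the diff hunk. Inline comments are
--     typically anchored to the added lines, so we extract the last N added lines.
--     """
--
--     if not diff_hunk:
--         return ""
--
--     lines = normalize_newlines(diff_hunk).split("\n")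
--     added_lines: list[str] = []
--     for line in lines:
--         if line.startswith("+") and not line.startswith("+++"):
--             added_lines.append(line[1:])
--
--     if not added_lines:
--         return ""
--
--     num_lines = max(1, num_lines)
--     if num_lines == 1:
--         return added_lines[-1]
--     return "\n".join(added_lines[-num_lines:])
-- ===== SOURCE B (Python) =====
-- def normalize_newlines(text: str) -> str:
--     return text.replace("\r\n", "\n").replace("\r", "\n")
--
-- def extract_original_from_diff_hunk(diff_hunk: str, num_lines: int = 1) -> str:
--     """Back-to-front scan: walk the hunk's lines in reverse, collecting up to
--     max(1, num_lines) added lines, and stop as soon as enough are found."""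
--     need = max(1, num_lines)
--     buf: list[str] = []
--     for line in reversed(normalize_newlines(diff_hunk).split("\n")):
--         if line.startswith("+") and not line.startswith("+++"):
--             buf.append(line[1:])
--             if len(buf) == need:
--                 break
--     if not buf:
--         return ""
--     return "\n".join(reversed(buf))
-- ===== Notes on version B (the rewrite author's own statement) =====
-- stated objective: alternative
-- what changed: Replaces the forward collect-all-added-lines-then-slice-the-tail pass with a reverse early-terminating scan that keeps only the last max(1,num_lines) added lines and breaks once it has enough.
import Mathlib
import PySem

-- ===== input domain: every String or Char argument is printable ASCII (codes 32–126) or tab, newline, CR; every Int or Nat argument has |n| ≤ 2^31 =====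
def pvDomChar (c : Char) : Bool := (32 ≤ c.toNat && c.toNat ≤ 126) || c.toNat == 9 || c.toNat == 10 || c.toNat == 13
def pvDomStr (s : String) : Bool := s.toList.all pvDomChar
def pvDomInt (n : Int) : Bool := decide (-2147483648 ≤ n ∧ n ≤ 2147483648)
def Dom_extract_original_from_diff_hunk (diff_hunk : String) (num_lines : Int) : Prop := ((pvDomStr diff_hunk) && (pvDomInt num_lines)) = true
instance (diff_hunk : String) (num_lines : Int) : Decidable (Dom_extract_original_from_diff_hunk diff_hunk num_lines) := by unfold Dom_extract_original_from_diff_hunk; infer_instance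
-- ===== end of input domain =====

-- B reads the lines back-to-front, stopping once it has the last max(1,num_lines) added lines; A collects all added lines, then slices the tail.

-- ===== PORT A =====
def normalize_newlines (text : String) : String :=
  PySem.Str.replace (PySem.Str.replace text "\r\n" "\n") "\r" "\n"

def extract_original_from_diff_hunk (diff_hunk : String) (num_lines : Int) : String :=
  if diff_hunk == "" then "" else
  let lines := (PySem.Str.split? (normalize_newlines diff_hunk) "\n").getD []
  let added_lines := lines.foldl (fun acc line =>
    if PySem.Str.startswith line "+" && !PySem.Str.startswith line "+++" then
      acc ++ [PySem.Str.slice line (some 1) none] else acc) []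
  if added_lines == [] then "" else
  let n := max 1 num_lines
  if n == 1 then (PySem.List.pyGet? added_lines (-1)).getD ""
  else PySem.Str.join "\n" (PySem.List.slice added_lines (some (-n)) none)

-- ===== PORT B =====
-- reverse scan with early break: collect line[1:] of added lines until `need` are gathered
def pvAltLoop (need : Nat) (buf : List String) : List String → List String
  | [] => buf
  | line :: rest =>
    if PySem.Str.startswith line "+" && !PySem.Str.startswith line "+++" then
      let buf' := buf ++ [PySem.Str.slice line (some 1) none]
      if buf'.length == need then buf' else pvAltLoop need buf' rest
    else pvAltLoop need buf rest

def extract_original_from_diff_hunk_alt (diff_hunk : String) (num_lines : Int) : String :=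
  let need := (max 1 num_lines).toNat
  let lines := (PySem.Str.split? (normalize_newlines diff_hunk) "\n").getD []
  let buf := pvAltLoop need [] lines.reverse
  if buf == [] then "" else PySem.Str.join "\n" buf.reverse

-- ===== PRECONDITION & SPEC =====
def Spec_extract_original_from_diff_hunk (diff_hunk : String) (num_lines : Int) (out : String) : Prop := out = extract_original_from_diff_hunk_alt diff_hunk num_lines
instance (diff_hunk : String) (num_lines : Int) (out : String) : Decidable (Spec_extract_original_from_diff_hunk diff_hunk num_lines out) := by unfold Spec_extract_original_from_diff_hunk; infer_instance

-- ===== CLAIM (what is proved, stated in full; the proofs are below) =====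
def Claim_equal_extract_original_from_diff_hunk : Prop := ∀ (diff_hunk : String) (num_lines : Int), Dom_extract_original_from_diff_hunk diff_hunk num_lines → Spec_extract_original_from_diff_hunk diff_hunk num_lines (extract_original_from_diff_hunk diff_hunk num_lines)

-- ===== LEMMAS AND PROOFS =====

def pvP (line : String) : Bool :=
  PySem.Str.startswith line "+" && !PySem.Str.startswith line "+++"

def pvG (line : String) : String := PySem.Str.slice line (some 1) none

theorem pvAltLoop_eq (need : Nat) : ∀ (l : List String) (buf : List String),
    buf.length < need →
    pvAltLoop need buf l = buf ++ ((l.filter pvP).map pvG).take (need - buf.length) := by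
  intro l
  induction l with
  | nil => intro buf h; simp [pvAltLoop]
  | cons line rest ih =>
    intro buf h
    by_cases hp : (PySem.Str.startswith line "+" && !PySem.Str.startswith line "+++") = true
    · have hp' : pvP line = true := hp
      simp only [pvAltLoop, hp, if_pos]
      by_cases he : ((buf ++ [PySem.Str.slice line (some 1) none]).length == need) = true
      · simp only [he, if_pos]
        have hlen : buf.length + 1 = need := by
          have := (beq_iff_eq (a := (buf ++ [PySem.Str.slice line (some 1) none]).length) (b := need)).mp he
          simpa using this
        have ht : need - buf.length = 1 := by omega
        simp [hp', ht, pvG]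
      · have hne : buf.length + 1 ≠ need := by
          intro hh
          exact he (beq_iff_eq.mpr (by simpa using hh))
        have hlt : buf.length + 1 < need := by omega
        rw [if_neg (by simpa using he)]
        rw [ih _ (by simpa using hlt)]
        have h1 : need - (buf.length + 1) + 1 = need - buf.length := by omega
        simp [hp', ← h1, pvG]
    · have hp' : pvP line = false := by simpa [pvP] using hp
      simp only [pvAltLoop, hp, if_neg, Bool.false_eq_true, not_false_iff]
      rw [ih _ h]
      simp [hp']

theorem pv_reverse_take (l : List String) (n : Nat) :
    (l.reverse.take n).reverse = l.drop (l.length - n) := by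
  rw [List.reverse_take, List.reverse_reverse, List.length_reverse]

theorem pv_drop_pred : ∀ (l : List String), l ≠ [] →
    l.drop (l.length - 1) = [l.getLast?.getD ""] := by
  intro l
  induction l with
  | nil => intro h; exact absurd rfl h
  | cons x t ih =>
    intro _
    cases t with
    | nil => simp
    | cons y t' =>
      have h2 : (y :: t') ≠ [] := by simp
      have := ih h2
      simp only [List.length_cons, Nat.add_sub_cancel, List.drop_succ_cons,
        List.getLast?_cons_cons]
      simpa only [List.length_cons, Nat.add_sub_cancel] using this

-- characterization of B: the reverse early-exit scan computes the tail slice of all added lines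
theorem pv_alt_char (diff_hunk : String) (num_lines : Int) :
    extract_original_from_diff_hunk_alt diff_hunk num_lines =
      (if (((PySem.Str.split? (normalize_newlines diff_hunk) "\n").getD []).filter pvP).map pvG = [] then ""
       else PySem.Str.join "\n"
         (((((PySem.Str.split? (normalize_newlines diff_hunk) "\n").getD []).filter pvP).map pvG).drop
           (((((PySem.Str.split? (normalize_newlines diff_hunk) "\n").getD []).filter pvP).map pvG).length
             - (max 1 num_lines).toNat))) := by
  have hone : (1:Int) ≤ max 1 num_lines := le_max_left 1 num_lines
  have hneed : 1 ≤ (max 1 num_lines).toNat := by omega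
  simp only [extract_original_from_diff_hunk_alt]
  rw [pvAltLoop_eq ((max 1 num_lines).toNat)
      ((PySem.Str.split? (normalize_newlines diff_hunk) "\n").getD []).reverse []
      (by simp only [List.length_nil]; omega)]
  simp only [List.nil_append, List.filter_reverse, List.map_reverse, List.length_nil, Nat.sub_zero]
  by_cases hz : (((PySem.Str.split? (normalize_newlines diff_hunk) "\n").getD []).filter pvP).map pvG = []
  · simp [hz]
  · have hbne : ¬ ((((PySem.Str.split? (normalize_newlines diff_hunk) "\n").getD []).filter pvP).map pvG).reverse.take ((max 1 num_lines).toNat) = [] := by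
      intro hh
      rcases List.take_eq_nil_iff.mp hh with h | h
      · omega
      · exact hz (by simpa using h)
    rw [if_neg (by simpa using hbne), if_neg hz, pv_reverse_take]

-- ===== VERDICT (by name: the statement is the Claim_ definition above) =====
theorem extract_original_from_diff_hunk_spec : Claim_equal_extract_original_from_diff_hunk := by
  intro diff_hunk num_lines _
  unfold Spec_extract_original_from_diff_hunk
  rw [pv_alt_char]
  simp only [extract_original_from_diff_hunk]
  by_cases h0 : (diff_hunk == "") = true
  · have hd : diff_hunk = "" := by simpa using h0
    subst hd
    rw [if_pos (by decide)]
    rw [show ((PySem.Str.split? (normalize_newlines "") "\n").getD []) = [""] from by decide]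
    rw [show List.filter pvP [""] = [] from by decide]
    simp
  · rw [if_neg h0]
    have hfold : List.foldl (fun acc line =>
        if PySem.Str.startswith line "+" && !PySem.Str.startswith line "+++" then
          acc ++ [PySem.Str.slice line (some 1) none] else acc) []
        ((PySem.Str.split? (normalize_newlines diff_hunk) "\n").getD [])
        = ((((PySem.Str.split? (normalize_newlines diff_hunk) "\n").getD []).filter pvP).map pvG) := by
      rw [PySem.List.foldl_append_if]
      simp only [List.nil_append]
      rfl
    rw [hfold]
    by_cases hz : (((PySem.Str.split? (normalize_newlines diff_hunk) "\n").getD []).filter pvP).map pvG = []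
    · simp [hz]
    · rw [if_neg (by simpa using hz), if_neg hz]
      have hone : (1:Int) ≤ max 1 num_lines := le_max_left 1 num_lines
      by_cases h1 : max 1 num_lines = 1
      · rw [if_pos (by simpa using h1)]
        rw [PySem.List.pyGet?_neg_one]
        rw [h1]
        have hd1 : ((((PySem.Str.split? (normalize_newlines diff_hunk) "\n").getD []).filter pvP).map pvG).drop
            (((((PySem.Str.split? (normalize_newlines diff_hunk) "\n").getD []).filter pvP).map pvG).length - (1:Int).toNat)
            = [((((PySem.Str.split? (normalize_newlines diff_hunk) "\n").getD []).filter pvP).map pvG).getLast?.getD ""] := by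
          rw [show ((1:Int).toNat) = 1 from rfl]
          exact pv_drop_pred _ hz
        rw [hd1]
        simp [PySem.Str.join]
      · rw [if_neg (by simpa using h1)]
        have hk : 0 < (max 1 num_lines).toNat := by omega
        have hs := PySem.List.slice_from_neg_natCast
          (xs := (((PySem.Str.split? (normalize_newlines diff_hunk) "\n").getD []).filter pvP).map pvG)
          (k := (max 1 num_lines).toNat) hk
        rw [Int.toNat_of_nonneg (by omega)] at hs
        rw [hs]
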